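-- pv_equiv track=rewrite | github.com/SRR967/OperacionesConjuntos | laboratorio.py | calcular_interseccion
-- ===== SOURCE A (Python) =====
-- def copiar_conjunto(A):
--     copia = []
--     for element in A:
--         copia.append(element)
--     return copia
--
-- def calcular_interseccion(conjuntos):
--     if not conjuntos:
--         return []
--     resultado = copiar_conjunto(conjuntos[0])
--
--     for conjunto in conjuntos[1:]:
--         nuevo_resultado = []
--         for elemento in resultado:
--             if elemento in conjunto:
--                 nuevo_resultado.append(elemento)
--         resultado = nuevo_resultado
--     return resultado
-- ===== SOURCE B (Python) =====
-- def calcular_interseccion(conjuntos):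
--     if not conjuntos:
--         return []
--     return [e for e in conjuntos[0] if all(e in c for c in conjuntos[1:])]
-- ===== Notes on version B (the rewrite author's own statement) =====
-- stated objective: simpler
-- what changed: Replaces A's repeated narrowing passes (rebuilding a shrinking intermediate list once per remaining set) by a single pass over the first set that checks each element against all remaining sets with an all-predicate.
import Mathlib
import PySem

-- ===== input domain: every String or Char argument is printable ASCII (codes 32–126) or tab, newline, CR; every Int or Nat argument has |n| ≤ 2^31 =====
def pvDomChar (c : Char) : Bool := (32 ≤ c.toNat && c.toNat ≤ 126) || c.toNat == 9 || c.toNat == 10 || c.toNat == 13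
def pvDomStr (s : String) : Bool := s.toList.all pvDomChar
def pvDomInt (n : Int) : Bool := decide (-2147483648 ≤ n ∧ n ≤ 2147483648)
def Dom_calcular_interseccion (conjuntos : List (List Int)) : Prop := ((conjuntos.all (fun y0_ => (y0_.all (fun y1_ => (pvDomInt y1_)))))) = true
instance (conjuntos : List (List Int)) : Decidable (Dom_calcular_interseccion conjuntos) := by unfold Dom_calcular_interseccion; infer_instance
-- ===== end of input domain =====

-- B rewrites A's repeated narrowing passes as one pass over the first set with an all-membership check (objective: simpler).

-- ===== PORT A =====
def copiar_conjunto (A : List Int) : List Int :=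
  A.foldl (fun copia element => copia ++ [element]) []

def calcular_interseccion (conjuntos : List (List Int)) : List Int :=
  match conjuntos with
  | [] => []
  | c0 :: rest =>
    rest.foldl
      (fun resultado conjunto =>
        resultado.foldl
          (fun nuevo elemento =>
            if conjunto.contains elemento then nuevo ++ [elemento] else nuevo)
          [])
      (copiar_conjunto c0)

-- ===== PORT B =====
def calcular_interseccion_alt (conjuntos : List (List Int)) : List Int :=
  match conjuntos with
  | [] => []
  | c0 :: rest => c0.filter (fun e => rest.all (fun c => c.contains e))

-- ===== PRECONDITION & SPEC =====
def Spec_calcular_interseccion (conjuntos : List (List Int)) (out : List Int) : Prop := out = calcular_interseccion_alt conjuntos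
instance (conjuntos : List (List Int)) (out : List Int) : Decidable (Spec_calcular_interseccion conjuntos out) := by unfold Spec_calcular_interseccion; infer_instance

-- ===== CLAIM (what is proved, stated in full; the proofs are below) =====
def Claim_equal_calcular_interseccion : Prop := ∀ (conjuntos : List (List Int)), Dom_calcular_interseccion conjuntos → Spec_calcular_interseccion conjuntos (calcular_interseccion conjuntos)

-- ===== LEMMAS AND PROOFS =====
theorem copiar_conjunto_eq (A : List Int) : copiar_conjunto A = A := by
  unfold copiar_conjunto
  rw [PySem.List.foldl_append_singleton_eq_map]
  simp

theorem inner_pass_eq_filter (conjunto resultado : List Int) :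
    resultado.foldl
      (fun nuevo elemento =>
        if conjunto.contains elemento then nuevo ++ [elemento] else nuevo) []
      = resultado.filter (fun e => conjunto.contains e) := by
  rw [PySem.List.foldl_append_if_eq_filter]
  congr 1


theorem fold_filter_eq_filter_all (rest : List (List Int)) (xs : List Int) :
    rest.foldl
      (fun resultado conjunto =>
        resultado.foldl
          (fun nuevo elemento =>
            if conjunto.contains elemento then nuevo ++ [elemento] else nuevo)
          []) xs
      = xs.filter (fun e => rest.all (fun c => c.contains e)) := by
  induction rest generalizing xs with
  | nil => simp
  | cons c rest ih =>
    simp only [List.foldl_cons]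
    rw [inner_pass_eq_filter, ih, List.filter_filter]
    congr 1
    funext a
    simp [Bool.and_comm]

-- ===== VERDICT (by name: the statement is the Claim_ definition above) =====
theorem calcular_interseccion_spec : Claim_equal_calcular_interseccion := by
  intro conjuntos _
  unfold Spec_calcular_interseccion calcular_interseccion calcular_interseccion_alt
  cases conjuntos with
  | nil => rfl
  | cons c0 rest =>
    simp only [copiar_conjunto_eq, fold_filter_eq_filter_all]
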